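-- pv_equiv track=rewrite | github.com/kunidesuyo/mahjong | xiangting/four_sets_one_pair.py | key_encoder
-- ===== SOURCE A (Python) =====
-- def key_encoder(tiles):
--     base = 5
--     v = 1
--     key = 0
--     for tile in tiles:
--         for t in tile:
--             key += v * t
--             v *= base
--     return key
-- ===== SOURCE B (Python) =====
-- def key_encoder(tiles):
--     # Horner's rule over the flattened values, most-significant first.
--     key = 0
--     for tile in reversed(tiles):
--         for t in reversed(tile):
--             key = key * 5 + t
--     return key
-- ===== Notes on version B (the rewrite author's own statement) =====
-- stated objective: alternative
-- what changed: B uses Horner's rule over the flattened values in fully reversed order (key = key*5 + t), maintaining no running power variable, instead of A's accumulator with a separately tracked power v.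
import Mathlib
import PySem

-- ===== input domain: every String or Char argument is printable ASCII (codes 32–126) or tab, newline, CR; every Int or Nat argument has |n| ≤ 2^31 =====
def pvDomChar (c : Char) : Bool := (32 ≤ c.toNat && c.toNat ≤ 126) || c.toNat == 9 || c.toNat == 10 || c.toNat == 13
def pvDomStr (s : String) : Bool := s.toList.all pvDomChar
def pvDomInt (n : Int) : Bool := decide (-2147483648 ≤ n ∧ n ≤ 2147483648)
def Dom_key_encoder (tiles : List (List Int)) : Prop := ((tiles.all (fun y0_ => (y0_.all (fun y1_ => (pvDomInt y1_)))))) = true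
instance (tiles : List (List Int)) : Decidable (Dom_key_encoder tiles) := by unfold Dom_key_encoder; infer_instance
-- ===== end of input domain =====

-- B re-encodes the same base-5 key with Horner's rule over the fully reversed flattened values,
-- eliminating A's running power variable (alternative decomposition, same cost).


-- ===== PORT A =====
-- state (v, key); outer loop over tiles, inner loop over each tile, exactly as in A
def key_encoder (tiles : List (List Int)) : Int :=
  (tiles.foldl
    (fun (st : Int × Int) tile =>
      tile.foldl (fun (st : Int × Int) t => (st.1 * 5, st.2 + st.1 * t)) st)
    (1, 0)).2

-- ===== PORT B =====
-- Horner's rule: iterate all values in fully reversed order, key = key*5 + t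
def key_encoder_alt (tiles : List (List Int)) : Int :=
  tiles.reverse.foldl
    (fun key tile => tile.reverse.foldl (fun key t => key * 5 + t) key)
    0

-- ===== PRECONDITION & SPEC =====
def Spec_key_encoder (tiles : List (List Int)) (out : Int) : Prop := out = key_encoder_alt tiles
instance (tiles : List (List Int)) (out : Int) : Decidable (Spec_key_encoder tiles out) := by unfold Spec_key_encoder; infer_instance

-- ===== CLAIM (what is proved, stated in full; the proofs are below) =====
def Claim_equal_key_encoder : Prop := ∀ (tiles : List (List Int)), Dom_key_encoder tiles → Spec_key_encoder tiles (key_encoder tiles)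

-- ===== LEMMAS AND PROOFS =====

-- Horner value of one flat list (B's inner loop started from 0)
def horner1 (l : List Int) : Int := l.reverse.foldl (fun key t => key * 5 + t) 0

-- Horner value of the whole nested list (B started from 0)
def hornerAll (tiles : List (List Int)) : Int :=
  tiles.reverse.foldl (fun key tile => tile.reverse.foldl (fun key t => key * 5 + t) key) 0

theorem horner1_cons (a : Int) (l : List Int) :
    horner1 (a :: l) = horner1 l * 5 + a := by
  simp [horner1, List.foldl_append]

-- running B's inner loop from an arbitrary start
theorem horner1_start (l : List Int) (k : Int) :
    l.reverse.foldl (fun key t => key * 5 + t) k = k * 5 ^ l.length + horner1 l := by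
  induction l generalizing k with
  | nil => simp [horner1]
  | cons a l ih =>
      simp only [List.reverse_cons, List.foldl_append, List.foldl_cons, List.foldl_nil,
        horner1, List.length_cons]
      rw [ih, ih]
      ring

-- A's inner loop from state (v, key)
theorem innerA (l : List Int) (v k : Int) :
    l.foldl (fun (st : Int × Int) t => (st.1 * 5, st.2 + st.1 * t)) (v, k)
      = (v * 5 ^ l.length, k + v * horner1 l) := by
  induction l generalizing v k with
  | nil => simp [horner1]
  | cons a l ih =>
      simp only [List.foldl_cons, List.length_cons]
      rw [ih]
      simp only [Prod.mk.injEq]; refine ⟨?_, ?_⟩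
      · ring
      · rw [horner1_cons]
        simp only [horner1]
        ring

theorem outerA (tiles : List (List Int)) (v k : Int) :
    tiles.foldl
      (fun (st : Int × Int) tile =>
        tile.foldl (fun (st : Int × Int) t => (st.1 * 5, st.2 + st.1 * t)) st)
      (v, k)
      = (v * 5 ^ (tiles.map List.length).sum, k + v * hornerAll tiles) := by
  induction tiles generalizing v k with
  | nil => simp [hornerAll]
  | cons a tiles ih =>
      simp only [List.foldl_cons, List.map_cons, List.sum_cons]
      rw [innerA, ih]
      simp only [Prod.mk.injEq]; refine ⟨?_, ?_⟩
      · rw [pow_add]; ring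
      · show _ = k + v * ((a :: tiles).reverse.foldl
            (fun key tile => tile.reverse.foldl (fun key t => key * 5 + t) key) 0)
        rw [List.reverse_cons, List.foldl_append]
        simp only [List.foldl_cons, List.foldl_nil]
        rw [horner1_start, hornerAll]
        ring

-- ===== VERDICT (by name: the statement is the Claim_ definition above) =====
theorem key_encoder_spec : Claim_equal_key_encoder := by
  intro tiles _
  show key_encoder tiles = key_encoder_alt tiles
  rw [key_encoder, outerA]
  simp [key_encoder_alt, hornerAll]
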